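-- pv_equiv track=rewrite | github.com/styagovamaria/2021-2-level-labs | lab_4/main.py | tokenize_by_letters
-- ===== SOURCE A (Python) =====
-- from typing import Tuple
--
-- def tokenize_by_letters(text: str) -> Tuple or int:
--     """
--     Tokenizes given sequence by letters
--     """
--
--     if not isinstance(text, str):
--         return -1
--
--     invaluable_trash = ['`', '~', '@', '#', '$', '%', '^', '&', '*', '(', ')', '_', '-', '+',
--                         '=', '{', '[', ']', '}', '|', '\\', ':', ';', '"', "'", '<', ',', '>',
--                         '/', '1', '2', '3', '4', '5', '6', '7', '8', '9', '0']
--     text = text.lower()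
--
--     for symbols in invaluable_trash:
--         text = text.replace(symbols, '')
--
--     if not text:
--         return ()
--
--     if text:
--         last_character = text[-1]
--         if last_character in ('.', '!', '?'):
--             text = text[:-1]
--
--     text = text.replace('.', '<stop>')
--     text = text.replace('?', '<stop>')
--     text = text.replace('!', '<stop>')
--
--     sentences = text.split('<stop>')
--
--     processed_tokens = []
--
--     for sentence in sentences:
--         tokens = sentence.split()
--
--         for token in tokens:
--             processed_characters = ['_']
--
--             for character in token:
--                 processed_characters.append(character)
--
--             processed_characters.append('_')
--
--             processed_tokens.append(tuple(processed_characters))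
--
--     return tuple(processed_tokens)
-- ===== SOURCE B (Python) =====
-- def tokenize_by_letters(text):
--     """Tokenizes given sequence by letters (single cleaning pass, one split)."""
--     if not isinstance(text, str):
--         return -1
--     trash = set('`~@#$%^&*()_-+={[]}|\\:;"\'<,>/1234567890')
--     cleaned = ''.join(' ' if c in '.?!' else c
--                       for c in text.lower() if c not in trash)
--     return tuple(('_',) + tuple(token) + ('_',) for token in cleaned.split())
-- ===== Notes on version B (the rewrite author's own statement) =====
-- stated objective: simpler
-- what changed: A makes 39 full replace passes to strip trash characters, strips a trailing terminator, makes three more replace passes inserting sentence markers, splits on the marker and then splits each sentence on whitespace; B does one character-level pass (filter trash, map terminators to spaces) and one whitespace split of the whole string.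
import Mathlib
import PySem

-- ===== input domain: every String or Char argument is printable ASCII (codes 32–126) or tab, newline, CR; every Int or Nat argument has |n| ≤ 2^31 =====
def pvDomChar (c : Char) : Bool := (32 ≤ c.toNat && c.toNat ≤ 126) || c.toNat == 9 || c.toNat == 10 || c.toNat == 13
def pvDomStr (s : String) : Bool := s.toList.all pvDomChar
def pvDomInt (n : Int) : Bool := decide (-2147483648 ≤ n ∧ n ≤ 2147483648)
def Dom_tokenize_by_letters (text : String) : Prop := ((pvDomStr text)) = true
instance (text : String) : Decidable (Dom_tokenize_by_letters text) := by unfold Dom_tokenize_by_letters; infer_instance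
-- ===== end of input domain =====

-- B replaces A's 39-pass replace chain and the '<stop>' sentence machinery by one
-- character-level cleaning pass followed by a single whitespace split (objective: simpler).

set_option maxHeartbeats 1000000


-- ===== PORT A =====
def tokenize_by_letters (text : String) : List (List String) :=
  let invaluable_trash : List String :=
    ["`", "~", "@", "#", "$", "%", "^", "&", "*", "(", ")", "_", "-", "+",
     "=", "{", "[", "]", "}", "|", "\\", ":", ";", "\"", "'", "<", ",", ">",
     "/", "1", "2", "3", "4", "5", "6", "7", "8", "9", "0"]
  let text1 := PySem.Str.lower text
  let text2 := invaluable_trash.foldl (fun t symbols => PySem.Str.replace t symbols "") text1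
  if PySem.Str.len text2 == 0 then []
  else
    let text3 :=
      match PySem.Str.pyGet? text2 (-1) with
      | some last_character =>
          if last_character = '.' ∨ last_character = '!' ∨ last_character = '?' then
            PySem.Str.slice text2 none (some (-1))
          else text2
      | none => text2   -- unreachable: text2 is nonempty on this branch
    let text4 := PySem.Str.replace (PySem.Str.replace (PySem.Str.replace text3 "." "<stop>") "?" "<stop>") "!" "<stop>"
    -- text4.split('<stop>'): the separator is non-empty, so this is Chars.splitOn
    let sentences := PySem.Chars.splitOn text4.toList "<stop>".toList
    sentences.foldl (fun processed_tokens sentence =>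
      (PySem.Chars.split₀ sentence).foldl (fun acc token =>
        acc ++ [(token.foldl (fun pcs character => pcs ++ [String.ofList [character]]) ["_"]) ++ ["_"]])
        processed_tokens) []

-- ===== PORT B =====
def tokenize_by_letters_alt (text : String) : List (List String) :=
  let trash : PySem.Set Char := PySem.Set.ofList "`~@#$%^&*()_-+={[]}|\\:;\"'<,>/1234567890".toList
  let cleaned := ((PySem.Chars.lower text.toList).filter (fun c => !PySem.Set.contains trash c)).map
      (fun c => if ".?!".toList.contains c then ' ' else c)
  (PySem.Chars.split₀ cleaned).map (fun token => ["_"] ++ token.map (fun c => String.ofList [c]) ++ ["_"])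

-- ===== PRECONDITION & SPEC =====
def Spec_tokenize_by_letters (text : String) (out : List (List String)) : Prop := out = tokenize_by_letters_alt text
instance (text : String) (out : List (List String)) : Decidable (Spec_tokenize_by_letters text out) := by unfold Spec_tokenize_by_letters; infer_instance

-- ===== CLAIM (what is proved, stated in full; the proofs are below) =====
def Claim_equal_tokenize_by_letters : Prop := ∀ (text : String), Dom_tokenize_by_letters text → Spec_tokenize_by_letters text (tokenize_by_letters text)

-- ===== LEMMAS AND PROOFS =====

/-- The 39 trash characters, in A's order. -/
def pvTrash : List Char := "`~@#$%^&*()_-+={[]}|\\:;\"'<,>/1234567890".toList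

/-- The sentence terminators, as a Bool predicate on characters. -/
def pvTerm (c : Char) : Bool := c == '.' || c == '?' || c == '!'

/-- One cleaning character of B: a terminator becomes a space, everything else stays. -/
def pvSub (c : Char) : Char := if pvTerm c then ' ' else c

/-- What A's three '<stop>' replaces do to one character. -/
def pvF (c : Char) : List Char := if pvTerm c then "<stop>".toList else [c]

/-- Reference splitter: words of `l` (separators = chars satisfying `p`), `cur` being the
    reversed current word. Mirrors the accumulator of `PySem.Chars.split₀.go`. -/
def pvWords (p : Char → Bool) : List Char → List Char → List (List Char)
  | [], cur => if cur.isEmpty then [] else [cur.reverse]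
  | c :: t, cur =>
      if p c then
        (if cur.isEmpty then pvWords p t [] else cur.reverse :: pvWords p t [])
      else pvWords p t (c :: cur)

lemma replace_go_single (c : Char) (new : List Char) :
    ∀ (l : List Char) (fuel : Nat) (acc : List Char), l.length ≤ fuel →
      PySem.Chars.replace.go [c] new fuel l acc
        = acc.reverse ++ l.flatMap (fun x => if x == c then new else [x]) := by
  intro l
  induction l with
  | nil =>
    intro fuel acc _
    rw [PySem.Chars.replace.go.eq_def]
    cases fuel <;> simp
  | cons x t ih =>
    intro fuel acc hle
    simp only [List.length_cons] at hle
    cases fuel with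
    | zero => omega
    | succ n =>
      rw [PySem.Chars.replace.go.eq_def]
      have hpre : ([c] : List Char).isPrefixOf (x :: t) = (c == x) := by
        simp [List.isPrefixOf]
      by_cases hx : c = x
      · subst hx
        simp only [hpre, BEq.rfl, if_pos, List.length_cons, List.length_nil,
          List.drop_succ_cons, List.drop_zero]
        rw [ih n (new.reverse ++ acc) (by omega)]
        simp [List.reverse_append]
      · have hx' : (c == x) = false := by simp [hx]
        have hx'' : (x == c) = false := by simp [Ne.symm hx]
        simp only [hpre, hx', Bool.false_eq_true, if_false]
        rw [ih n (x :: acc) (by omega)]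
        simp [Ne.symm hx]

lemma replace_single (s : List Char) (c : Char) (new : List Char) :
    PySem.Chars.replace s [c] new = s.flatMap (fun x => if x == c then new else [x]) := by
  rw [show PySem.Chars.replace s [c] new = PySem.Chars.replace.go [c] new s.length s [] from by
    simp [PySem.Chars.replace]]
  simpa using replace_go_single c new s s.length [] le_rfl

lemma flatMap_if_nil (c : Char) (l : List Char) :
    l.flatMap (fun x => if x == c then [] else [x]) = l.filter (fun x => !(x == c)) := by
  induction l with
  | nil => simp
  | cons x t ih =>
    simp only [List.flatMap_cons, List.filter_cons, ih]
    cases x == c <;> simp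

/-- A's trash-stripping fold is a single filter. -/
lemma clean_foldl : ∀ (cs : List Char) (s : String),
    ((cs.map (fun c => String.ofList [c])).foldl (fun t y => PySem.Str.replace t y "") s).toList
      = s.toList.filter (fun x => !cs.contains x) := by
  intro cs
  induction cs with
  | nil => intro s; simp
  | cons c cst ih =>
    intro s
    simp only [List.map_cons, List.foldl_cons]
    rw [ih, PySem.Str.toList_replace]
    rw [show (String.ofList [c]).toList = [c] from by simp]
    rw [show ("" : String).toList = [] from by decide]
    rw [replace_single, flatMap_if_nil, List.filter_filter]
    apply List.filter_congr
    intro x _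
    rw [List.contains_cons]
    cases hx : x == c <;> cases hy : cst.contains x <;> rfl

/-- A's three '<stop>' replaces together are `flatMap pvF`. -/
lemma replace3 (t : List Char) :
    PySem.Chars.replace (PySem.Chars.replace (PySem.Chars.replace t ".".toList "<stop>".toList)
        "?".toList "<stop>".toList) "!".toList "<stop>".toList = t.flatMap pvF := by
  rw [show (".".toList : List Char) = ['.'] from by decide,
      show ("?".toList : List Char) = ['?'] from by decide,
      show ("!".toList : List Char) = ['!'] from by decide,
      replace_single, replace_single, replace_single]
  simp only [List.flatMap_assoc]
  congr 1
  funext x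
  by_cases hx1 : x = '.'
  · subst hx1; decide
  · by_cases hx2 : x = '?'
    · subst hx2; decide
    · by_cases hx3 : x = '!'
      · subst hx3; decide
      · simp [pvF, pvTerm, hx1, hx2, hx3]

lemma splitOn_go_flatMap :
    ∀ (l cur : List Char) (acc : List (List Char)) (fuel : Nat),
      (l.flatMap pvF).length ≤ fuel → '<' ∉ l →
      PySem.Chars.splitOn.go "<stop>".toList fuel (l.flatMap pvF) cur acc
        = acc.reverse ++ (l.splitOnP pvTerm).modifyHead (cur.reverse ++ ·) := by
  intro l
  induction l with
  | nil =>
    intro cur acc fuel _ _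
    simp only [List.flatMap_nil]
    rw [PySem.Chars.splitOn.go.eq_def]
    cases fuel <;> simp [List.splitOnP_nil]
  | cons x t ih =>
    intro cur acc fuel hfuel hlt
    have hxne : x ≠ '<' := by
      intro h; exact hlt (by simp [h])
    have hlt' : '<' ∉ t := fun h => hlt (List.mem_cons_of_mem _ h)
    obtain ⟨fp, rs, hsp⟩ := List.exists_cons_of_ne_nil (List.splitOnP_ne_nil pvTerm t)
    have hstop : ("<stop>".toList : List Char) = ['<', 's', 't', 'o', 'p', '>'] := by decide
    by_cases hx : pvTerm x = true
    · have hpvf : pvF x = ['<', 's', 't', 'o', 'p', '>'] := by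
        unfold pvF; rw [if_pos hx]; decide
      have hflat : (x :: t).flatMap pvF
          = '<' :: 's' :: 't' :: 'o' :: 'p' :: '>' :: t.flatMap pvF := by
        rw [List.flatMap_cons, hpvf]; rfl
      cases fuel with
      | zero => rw [hflat] at hfuel; simp at hfuel
      | succ n =>
        rw [hflat, PySem.Chars.splitOn.go.eq_def, hstop]
        have hpre : (['<', 's', 't', 'o', 'p', '>'] : List Char).isPrefixOf
            ('<' :: 's' :: 't' :: 'o' :: 'p' :: '>' :: t.flatMap pvF) = true := by
          simp [List.isPrefixOf]
        simp only [hpre, if_true, List.length_cons, List.length_nil,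
          List.drop_succ_cons, List.drop_zero, Nat.reduceAdd]
        have ih' := ih [] (cur.reverse :: acc) n
          (by rw [hflat] at hfuel; simp only [List.length_cons] at hfuel; omega) hlt'
        rw [hstop] at ih'
        rw [ih', List.splitOnP_cons, if_pos hx, hsp]
        simp [List.modifyHead_cons]
    · have hx' : pvTerm x = false := by simpa using hx
      have hpvf : pvF x = [x] := by simp [pvF, hx']
      have hflat : (x :: t).flatMap pvF = x :: t.flatMap pvF := by
        rw [List.flatMap_cons, hpvf]; rfl
      cases fuel with
      | zero => rw [hflat] at hfuel; simp at hfuel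
      | succ n =>
        rw [hflat, PySem.Chars.splitOn.go.eq_def, hstop]
        have hne : ('<' == x) = false := by
          simp only [beq_eq_false_iff_ne, ne_eq]
          exact fun h => hxne h.symm
        have hpre : (['<', 's', 't', 'o', 'p', '>'] : List Char).isPrefixOf
            (x :: t.flatMap pvF) = false := by
          simp [List.isPrefixOf, hne]
        simp only [hpre, Bool.false_eq_true, if_false]
        have ih' := ih (x :: cur) acc n
          (by rw [hflat] at hfuel; simp only [List.length_cons] at hfuel; omega) hlt'
        rw [hstop] at ih'
        rw [ih', List.splitOnP_cons, if_neg (by simp [hx']), hsp]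
        simp [List.modifyHead_cons]

/-- Splitting the replaced text on '<stop>' is splitting the original on terminators. -/
lemma splitOn_spec (l : List Char) (h : '<' ∉ l) :
    PySem.Chars.splitOn (l.flatMap pvF) "<stop>".toList = l.splitOnP pvTerm := by
  rw [show PySem.Chars.splitOn (l.flatMap pvF) "<stop>".toList
        = PySem.Chars.splitOn.go "<stop>".toList ((l.flatMap pvF).length + 1) (l.flatMap pvF) [] []
      from by simp [PySem.Chars.splitOn]]
  rw [splitOn_go_flatMap l [] [] _ (by omega) h]
  obtain ⟨fp, rs, hsp⟩ := List.exists_cons_of_ne_nil (List.splitOnP_ne_nil pvTerm l)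
  simp [hsp]

lemma split₀_go_spec : ∀ (l cur : List Char) (acc : List (List Char)),
    PySem.Chars.split₀.go l cur acc = acc.reverse ++ pvWords PySem.Chars.isspace l cur := by
  intro l
  induction l with
  | nil =>
    intro cur acc
    rw [PySem.Chars.split₀.go.eq_def]
    by_cases h : cur.isEmpty <;> simp [pvWords, h]
  | cons c t ih =>
    intro cur acc
    rw [PySem.Chars.split₀.go.eq_def]
    by_cases hc : PySem.Chars.isspace c
    · by_cases hcur : cur.isEmpty <;> simp [hc, hcur, ih, pvWords]
    · simp [hc, ih, pvWords]

lemma split₀_eq_words (l : List Char) :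
    PySem.Chars.split₀ l = pvWords PySem.Chars.isspace l [] := by
  rw [show PySem.Chars.split₀ l = PySem.Chars.split₀.go l [] [] from rfl]
  simpa using split₀_go_spec l [] []

lemma words_flat (p q : Char → Bool) :
    ∀ (l cur fp : List Char) (rest : List (List Char)),
      l.splitOnP q = fp :: rest →
      pvWords p fp cur ++ rest.flatMap (fun x => pvWords p x [])
        = pvWords (fun c => p c || q c) l cur := by
  intro l
  induction l with
  | nil =>
    intro cur fp rest h
    rw [List.splitOnP_nil] at h
    injection h with h1 h2
    subst h1; subst h2
    by_cases hcur : cur.isEmpty <;> simp [pvWords, hcur]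
  | cons c t ih =>
    intro cur fp rest h
    obtain ⟨fp', rs', hsp⟩ := List.exists_cons_of_ne_nil (List.splitOnP_ne_nil q t)
    rw [List.splitOnP_cons] at h
    by_cases hq : q c = true
    · rw [if_pos hq] at h
      injection h with h1 h2
      subst h1; subst h2
      have ihx := ih [] fp' rs' hsp
      rw [hsp, List.flatMap_cons, ihx]
      by_cases hcur : cur.isEmpty <;> simp [pvWords, hq, hcur]
    · rw [if_neg hq, hsp, List.modifyHead_cons] at h
      injection h with h1 h2
      subst h1; subst h2
      have hq' : q c = false := by simpa using hq
      by_cases hp : p c = true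
      · have ihx := ih [] fp' rs' hsp
        by_cases hcur : cur.isEmpty <;>
          simp [pvWords, hp, hq', hcur, List.cons_append, ihx]
      · have hp' : p c = false := by simpa using hp
        have ihx := ih (c :: cur) fp' rs' hsp
        simp [pvWords, hp', hq', ihx]

/-- Words-within-pieces = words for the joint separator predicate. -/
lemma flatMap_words (p q : Char → Bool) (l : List Char) :
    (l.splitOnP q).flatMap (fun x => pvWords p x [])
      = pvWords (fun c => p c || q c) l [] := by
  obtain ⟨fp, rs, hsp⟩ := List.exists_cons_of_ne_nil (List.splitOnP_ne_nil q l)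
  rw [hsp, List.flatMap_cons]
  exact words_flat p q l [] fp rs hsp

lemma words_map (p q : Char → Bool) (f : Char → Char)
    (h1 : ∀ c, p (f c) = q c) (h2 : ∀ c, q c = false → f c = c) :
    ∀ (l cur : List Char), pvWords p (l.map f) cur = pvWords q l cur := by
  intro l
  induction l with
  | nil => intro cur; simp [pvWords]
  | cons c t ih =>
    intro cur
    rw [List.map_cons]
    by_cases hqc : q c = true
    · simp [pvWords, h1, hqc, ih]
    · have hq' : q c = false := by simpa using hqc
      simp only [pvWords, h1, hq', Bool.false_eq_true, if_false]
      rw [h2 c hq']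
      exact ih (c :: cur)

lemma words_concat_sep (p : Char → Bool) (c : Char) (hc : p c = true) :
    ∀ (l cur : List Char), pvWords p (l ++ [c]) cur = pvWords p l cur := by
  intro l
  induction l with
  | nil => intro cur; by_cases hcur : cur.isEmpty <;> simp [pvWords, hc, hcur]
  | cons x t ih => intro cur; by_cases hx : p x <;> simp [pvWords, hx, ih]

lemma isspace_sub (c : Char) :
    PySem.Chars.isspace (pvSub c) = (PySem.Chars.isspace c || pvTerm c) := by
  by_cases h : pvTerm c = true
  · have hsp : PySem.Chars.isspace ' ' = true := by decide
    have hc : c = '.' ∨ c = '?' ∨ c = '!' := by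
      simp only [pvTerm, Bool.or_eq_true, beq_iff_eq] at h
      tauto
    rcases hc with rfl | rfl | rfl <;> simp [pvSub, h, hsp]
  · have h' : pvTerm c = false := by simpa using h
    simp [pvSub, h']

/-- Core equivalence: A's split-on-'<stop>'-then-whitespace equals B's single split,
    for any `t` (A's possibly end-stripped text) with the same words as `s`. -/
lemma core (t s : List Char) (hlt : '<' ∉ t)
    (hw : pvWords (fun c => PySem.Chars.isspace c || pvTerm c) t []
        = pvWords (fun c => PySem.Chars.isspace c || pvTerm c) s []) :
    (PySem.Chars.splitOn (t.flatMap pvF) "<stop>".toList).flatMap PySem.Chars.split₀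
      = PySem.Chars.split₀ (s.map pvSub) := by
  rw [splitOn_spec t hlt]
  have h1 : (t.splitOnP pvTerm).flatMap PySem.Chars.split₀
      = (t.splitOnP pvTerm).flatMap (fun x => pvWords PySem.Chars.isspace x []) := by
    congr 1; funext x; exact split₀_eq_words x
  rw [h1, flatMap_words, hw, split₀_eq_words]
  refine (words_map PySem.Chars.isspace _ pvSub isspace_sub
    (fun c h => by
      have h2 : pvTerm c = false := by
        cases hp : pvTerm c
        · rfl
        · rw [hp] at h; simp at h
      simp [pvSub, h2]) s []).symm

-- ===== VERDICT (by name: the statement is the Claim_ definition above) =====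
theorem tokenize_by_letters_spec : Claim_equal_tokenize_by_letters := by
  intro text _
  show tokenize_by_letters text = tokenize_by_letters_alt text
  simp only [tokenize_by_letters, tokenize_by_letters_alt]
  rw [show (["`", "~", "@", "#", "$", "%", "^", "&", "*", "(", ")", "_", "-", "+",
      "=", "{", "[", "]", "}", "|", "\\", ":", ";", "\"", "'", "<", ",", ">",
      "/", "1", "2", "3", "4", "5", "6", "7", "8", "9", "0"] : List String)
        = pvTrash.map (fun c => String.ofList [c]) from by decide]
  rw [show PySem.Set.ofList "`~@#$%^&*()_-+={[]}|\\:;\"'<,>/1234567890".toList = pvTrash from by decide]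
  rw [show (fun c => !PySem.Set.contains pvTrash c) = (fun x => !pvTrash.contains x) from rfl]
  rw [show (fun c => if (".?!".toList.contains c) then ' ' else c) = pvSub from by
    funext c
    have hcont : (".?!".toList.contains c) = pvTerm c := by
      rw [show (".?!".toList : List Char) = ['.', '?', '!'] from by decide]
      simp only [List.contains_cons, pvTerm]
      cases c == '.' <;> cases c == '?' <;> cases c == '!' <;> rfl
    rw [hcont]
    rfl]
  set T2 : String := (pvTrash.map (fun c => String.ofList [c])).foldl
      (fun t symbols => PySem.Str.replace t symbols "") (PySem.Str.lower text) with hT2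
  set s : List Char := (PySem.Chars.lower text.toList).filter (fun x => !pvTrash.contains x) with hs
  have hT2l : T2.toList = s := by
    rw [hT2, clean_foldl, PySem.Str.toList_lower, hs]
  by_cases hsE : s = []
  · rw [if_pos (by rw [PySem.Str.len_eq, hT2l, hsE]; decide)]
    rw [hsE]
    rfl
  · rw [if_neg (by rw [PySem.Str.len_eq, hT2l]; simp [hsE])]
    obtain ⟨ini, c, hconc⟩ : ∃ ini c, s = ini ++ [c] := by
      rcases List.eq_nil_or_concat s with h | ⟨ini, c, h⟩
      · exact absurd h hsE
      · exact ⟨ini, c, by simpa [List.concat_eq_append] using h⟩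
    have hlts : '<' ∉ s := by
      rw [hs]
      intro hm
      have hp := List.of_mem_filter hm
      rw [show pvTrash.contains '<' = true from by decide] at hp
      simp at hp
    have hget : PySem.Str.pyGet? T2 (-1) = some c := by
      rw [PySem.Str.pyGet?_eq]
      simp [hT2l, hconc, PySem.Chars.pyGet?_eq_listPyGet?, PySem.List.pyGet?, PySem.List.pyIdx?]
    rw [hget]
    dsimp only
    by_cases hterm : c = '.' ∨ c = '!' ∨ c = '?'
    · rw [if_pos hterm]
      have hlt : '<' ∉ ini := fun hm => hlts (by rw [hconc]; exact List.mem_append_left _ hm)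
      have hpq : (PySem.Chars.isspace c || pvTerm c) = true := by
        rcases hterm with rfl | rfl | rfl <;> decide
      have hw : pvWords (fun c => PySem.Chars.isspace c || pvTerm c) ini []
          = pvWords (fun c => PySem.Chars.isspace c || pvTerm c) s [] := by
        rw [hconc]
        exact (words_concat_sep _ c hpq ini []).symm
      have h4 : (PySem.Str.replace (PySem.Str.replace (PySem.Str.replace
          (PySem.Str.slice T2 none (some (-1))) "." "<stop>") "?" "<stop>") "!" "<stop>").toList
          = ini.flatMap pvF := by
        simp only [PySem.Str.toList_replace]
        rw [PySem.Str.slice_to_neg_one, hT2l, hconc, List.dropLast_concat]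
        exact replace3 ini
      rw [h4]
      simp only [PySem.List.foldl_append_singleton_eq_map, PySem.List.foldl_append_eq_flatMap,
        List.nil_append]
      rw [← List.map_flatMap, core ini s hlt hw]
    · rw [if_neg hterm]
      have h4 : (PySem.Str.replace (PySem.Str.replace (PySem.Str.replace
          T2 "." "<stop>") "?" "<stop>") "!" "<stop>").toList = s.flatMap pvF := by
        simp only [PySem.Str.toList_replace]
        rw [hT2l]
        exact replace3 s
      rw [h4]
      simp only [PySem.List.foldl_append_singleton_eq_map, PySem.List.foldl_append_eq_flatMap,
        List.nil_append]
      rw [← List.map_flatMap, core s s hlts rfl]
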